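-- pv_equiv track=rewrite | github.com/mwizzle7/mortgage-agent | app/rag/ingest.py | _split_header_body
-- ===== SOURCE A (Python) =====
-- from typing import Dict, List, Tuple
--
-- def _split_header_body(raw_text: str) -> Tuple[Dict[str, str], List[str]]:
--     header_lines: List[str] = []
--     body_lines: List[str] = []
--     in_header = True
--
--     for line in raw_text.splitlines():
--         if in_header and line.strip() == "---":
--             in_header = False
--             continue
--         if in_header:
--             header_lines.append(line)
--         else:
--             body_lines.append(line)
--
--     metadata: Dict[str, str] = {}
--     for line in header_lines:
--         if ":" not in line:
--             continue
--         key, value = line.split(":", 1)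
--         key = key.strip().lower()
--         value = value.strip()
--         if key:
--             metadata[key] = value
--     return metadata, body_lines
-- ===== SOURCE B (Python) =====
-- from typing import Dict, List, Tuple
--
-- def _split_header_body(raw_text: str) -> Tuple[Dict[str, str], List[str]]:
--     lines = raw_text.splitlines()
--     header, body = lines, []
--     for i, line in enumerate(lines):
--         if line.strip() == "---":
--             header, body = lines[:i], lines[i + 1:]
--             break
--     pairs = [
--         (key, v.strip())
--         for k, v in (line.split(":", 1) for line in header if ":" in line)
--         if (key := k.strip().lower())
--     ]
--     return dict(pairs), body
-- ===== Notes on version B (the rewrite author's own statement) =====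
-- stated objective: alternative
-- what changed: Replaces A's stateful in_header-toggling single pass with a locate-then-slice decomposition (find the index of the first '---' line, slice header/body) and builds the metadata as a pair list via a comprehension followed by one dict() call instead of inserting inside the scan.
import Mathlib
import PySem

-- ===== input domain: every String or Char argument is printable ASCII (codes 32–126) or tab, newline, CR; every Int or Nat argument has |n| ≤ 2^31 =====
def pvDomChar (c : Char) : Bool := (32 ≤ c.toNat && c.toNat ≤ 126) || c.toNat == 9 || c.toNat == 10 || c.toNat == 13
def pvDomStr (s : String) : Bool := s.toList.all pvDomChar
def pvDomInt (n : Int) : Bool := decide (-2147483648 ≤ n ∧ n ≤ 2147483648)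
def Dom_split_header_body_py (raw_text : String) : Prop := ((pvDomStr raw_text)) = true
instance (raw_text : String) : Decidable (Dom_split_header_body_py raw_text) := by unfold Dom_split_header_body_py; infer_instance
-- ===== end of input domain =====

-- B replaces A's stateful in_header-toggling single pass by a locate-then-slice two-phase
-- decomposition (find the first '---' line, slice header/body, then build the metadata
-- pairs with a comprehension and one dict() call); same return value, objective: alternative.

-- ===== PORT A =====
-- loop body of A's first pass; state = (header_lines, body_lines, in_header)
def aStep (st : List String × List String × Bool) (line : String) :
    List String × List String × Bool :=
  if st.2.2 && (PySem.Str.strip line == "---") then (st.1, st.2.1, false)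
  else if st.2.2 then (st.1 ++ [line], st.2.1, st.2.2)
  else (st.1, st.2.1 ++ [line], st.2.2)

-- loop body of A's second pass; `line.split(":", 1)` with ":" in line always yields two
-- parts, ported via PySem.Str.splitMax? (the `| _ => d` arm is the unreachable shape)
def aParse (d : PySem.Dict String String) (line : String) : PySem.Dict String String :=
  if PySem.Str.isIn ":" line then
    match PySem.Str.splitMax? line ":" 1 with
    | some (k :: v :: _) =>
        let key := PySem.Str.lower (PySem.Str.strip k)
        let value := PySem.Str.strip v
        if key ≠ "" then d.insert key value else d
    | _ => d
  else d

def split_header_body_py (raw_text : String) : (List (String × String)) × List String :=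
  let st := (PySem.Str.splitlines raw_text).foldl aStep ([], [], true)
  let metadata := st.1.foldl aParse PySem.Dict.empty
  (metadata.items, st.2.1)

-- ===== PORT B =====
-- B's locating loop: index of the first line whose strip is "---"
def findDelim : List String → Option Nat
  | [] => none
  | l :: rest =>
      if PySem.Str.strip l == "---" then some 0 else (findDelim rest).map (· + 1)

-- B's comprehension: filter ":" in line, split each, keep the pairs with nonempty key
def altPairs (header : List String) : List (String × String) :=
  ((header.filter (fun l => PySem.Str.isIn ":" l)).map
      (fun l => PySem.Str.splitMax? l ":" 1)).filterMap
    (fun parts =>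
      match parts with
      | some (k :: v :: _) =>
          let key := PySem.Str.lower (PySem.Str.strip k)
          if key ≠ "" then some (key, PySem.Str.strip v) else none
      | _ => none)

def split_header_body_py_alt (raw_text : String) : (List (String × String)) × List String :=
  let lines := PySem.Str.splitlines raw_text
  let hb :=
    match findDelim lines with
    | some i => (lines.take i, lines.drop (i + 1))
    | none => (lines, ([] : List String))
  ((PySem.Dict.ofList (altPairs hb.1)).items, hb.2)

-- ===== PRECONDITION & SPEC =====
def Spec_split_header_body_py (raw_text : String) (out : (List (String × String)) × List String) : Prop := out = split_header_body_py_alt raw_text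
instance (raw_text : String) (out : (List (String × String)) × List String) : Decidable (Spec_split_header_body_py raw_text out) := by unfold Spec_split_header_body_py; infer_instance

-- ===== CLAIM (what is proved, stated in full; the proofs are below) =====
def Claim_equal_split_header_body_py : Prop := ∀ (raw_text : String), Dom_split_header_body_py raw_text → Spec_split_header_body_py raw_text (split_header_body_py raw_text)

-- ===== LEMMAS AND PROOFS =====

-- once the delimiter has been seen, A's loop pushes every remaining line to body
lemma foldl_aStep_false (lines : List String) (hs bs : List String) :
    lines.foldl aStep (hs, bs, false) = (hs, bs ++ lines, false) := by
  induction lines generalizing bs with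
  | nil => simp
  | cons l rest ih => simp [aStep, ih]

-- A's first pass, characterised by the position of the first '---' line
lemma foldl_aStep_true (lines : List String) (hs bs : List String) :
    lines.foldl aStep (hs, bs, true) =
      match findDelim lines with
      | some i => (hs ++ lines.take i, bs ++ lines.drop (i + 1), false)
      | none => (hs ++ lines, bs, true) := by
  induction lines generalizing hs with
  | nil => simp [findDelim]
  | cons l rest ih =>
    by_cases h : PySem.Str.strip l == "---"
    · simp [findDelim, h, List.foldl_cons, aStep, foldl_aStep_false]
    · simp only [findDelim, h, List.foldl_cons, aStep, Bool.true_and, if_false,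
        Bool.false_eq_true, if_true, ih (hs ++ [l])]
      cases findDelim rest <;> simp

-- the single pointwise parse both programs share
def parseLine (line : String) : Option (String × String) :=
  if PySem.Str.isIn ":" line then
    match PySem.Str.splitMax? line ":" 1 with
    | some (k :: v :: _) =>
        let key := PySem.Str.lower (PySem.Str.strip k)
        if key ≠ "" then some (key, PySem.Str.strip v) else none
    | _ => none
  else none

lemma altPairs_eq_filterMap (header : List String) :
    altPairs header = header.filterMap parseLine := by
  induction header with
  | nil => rfl
  | cons l rest ih =>
    by_cases h : PySem.Chars.isIn [':'] l.toList = true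
    · cases hsp : PySem.Str.splitMax? l ":" 1 with
      | none => simpa [altPairs, parseLine, List.filter_cons, h, hsp] using ih
      | some parts =>
        match parts with
        | [] => simpa [altPairs, parseLine, List.filter_cons, h, hsp] using ih
        | [k] => simpa [altPairs, parseLine, List.filter_cons, h, hsp] using ih
        | k :: v :: t =>
          by_cases hk : PySem.Str.lower (PySem.Str.strip k) = ""
          · simpa [altPairs, parseLine, List.filter_cons, h, hsp, hk] using ih
          · simpa [altPairs, parseLine, List.filter_cons, h, hsp, hk] using ih
    · simpa [altPairs, parseLine, List.filter_cons, h] using ih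

lemma aParse_eq (d : PySem.Dict String String) (line : String) :
    aParse d line =
      match parseLine line with
      | some p => d.insert p.1 p.2
      | none => d := by
  by_cases h : PySem.Chars.isIn [':'] line.toList = true
  · cases hsp : PySem.Str.splitMax? line ":" 1 with
    | none => simp [aParse, parseLine, h, hsp]
    | some parts =>
      match parts with
      | [] => simp [aParse, parseLine, h, hsp]
      | [k] => simp [aParse, parseLine, h, hsp]
      | k :: v :: t =>
        by_cases hk : PySem.Str.lower (PySem.Str.strip k) = "" <;>
          simp [aParse, parseLine, h, hsp, hk]
  · simp [aParse, parseLine, h]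

-- A's insert-as-you-scan second pass equals B's build-pairs-then-dict()
lemma meta_eq (header : List String) (d : PySem.Dict String String) :
    header.foldl aParse d =
      (altPairs header).foldl (fun d p => d.insert p.1 p.2) d := by
  rw [altPairs_eq_filterMap, List.foldl_filterMap]
  refine List.foldl_ext _ _ _ (fun b a _ => ?_)
  rw [aParse_eq]; cases parseLine a <;> rfl

-- ===== VERDICT (by name: the statement is the Claim_ definition above) =====
theorem split_header_body_py_spec : Claim_equal_split_header_body_py := by
  intro raw_text _
  unfold Spec_split_header_body_py split_header_body_py split_header_body_py_alt
  simp only [foldl_aStep_true, meta_eq]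
  cases findDelim (PySem.Str.splitlines raw_text) <;> rfl
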